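-- pv_equiv track=rewrite | github.com/soyukke/lean-unsolved | scripts/collatz_v2_independence.py | get_v2_sequence
-- ===== SOURCE A (Python) =====
-- def v2(n):
--     """n の 2-adic valuation"""
--     if n == 0:
--         return 999
--     c = 0
--     while n % 2 == 0:
--         n //= 2
--         c += 1
--     return c
--
-- def syracuse(n):
--     """Syracuse T(n) = (3n+1)/2^{v2(3n+1)} for odd n"""
--     val = 3 * n + 1
--     while val % 2 == 0:
--         val //= 2
--     return val
--
-- def v2_of_3n1(n):
--     """v2(3n+1) for odd n"""
--     return v2(3 * n + 1)
--
-- def get_v2_sequence(n, length):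
--     """奇数 n から始めて length 回の Syracuse ステップの v2 列を返す"""
--     seq = []
--     current = n
--     for _ in range(length):
--         if current <= 0:
--             break
--         v = v2_of_3n1(current)
--         seq.append(v)
--         current = syracuse(current)
--         if current == 1:
--             break
--     return seq
-- ===== SOURCE B (Python) =====
-- def get_v2_sequence(n, length):
--     if length <= 0 or n <= 0:
--         return []
--     val = 3 * n + 1
--     low = val ^ (val & (val - 1))   # isolate the lowest set bit: low = 2**v2(val)
--     c = low.bit_length() - 1        # v2(3n+1) without any division loop
--     nxt = val >> c                  # odd part of 3n+1 in one shift
--     if nxt == 1: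
--         return [c]
--     return [c] + get_v2_sequence(nxt, length - 1)
-- ===== Notes on version B (the rewrite author's own statement) =====
-- stated objective: alternative
-- what changed: Replaces A's repeated divide-by-2 scans (v2 count loop plus a second syracuse re-division loop) with a loop-free bit trick per step -- val ^ (val & (val-1)) isolates the lowest set bit, bit_length()-1 gives v2(3n+1) and one right shift gives the odd part -- and builds the sequence by recursion on length instead of an iterative accumulator loop.
import Mathlib
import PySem

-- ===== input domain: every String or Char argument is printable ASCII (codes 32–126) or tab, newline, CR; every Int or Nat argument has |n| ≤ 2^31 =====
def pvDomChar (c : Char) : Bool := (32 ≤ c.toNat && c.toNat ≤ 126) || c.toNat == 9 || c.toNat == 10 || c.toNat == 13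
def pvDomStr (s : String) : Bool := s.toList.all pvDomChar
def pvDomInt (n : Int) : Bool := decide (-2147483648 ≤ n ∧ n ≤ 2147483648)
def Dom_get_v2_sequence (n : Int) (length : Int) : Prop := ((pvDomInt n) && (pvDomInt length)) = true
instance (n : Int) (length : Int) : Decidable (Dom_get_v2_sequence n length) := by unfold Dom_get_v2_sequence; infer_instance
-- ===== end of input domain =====

-- B computes v2(3n+1) and the odd part per step by the lowest-set-bit trick
-- (val ^ (val & (val-1)), bit_length, one shift) instead of A's divide-by-2 loops,
-- and recurses on length instead of looping; objective: alternative.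

-- ===== PORT A =====
-- while n % 2 == 0: n //= 2; c += 1   (the 'n ≠ 0' conjunct is only a totality guard:
-- Python diverges at n = 0, and every call site here has n ≠ 0)
def pvV2Loop (n c : Int) : Int :=
  if h : PySem.Int.mod n 2 = 0 ∧ n ≠ 0 then pvV2Loop (PySem.Int.floordiv n 2) (c + 1) else c
termination_by n.natAbs
decreasing_by
  have h2 := h.1
  rw [PySem.Int.mod_eq_emod_of_pos (by omega)] at h2
  rw [PySem.Int.floordiv_eq_ediv_of_pos (by omega)]
  omega

def v2 (n : Int) : Int :=
  if n = 0 then 999 else pvV2Loop n 0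

-- while val % 2 == 0: val //= 2   (same totality guard)
def pvSyrLoop (val : Int) : Int :=
  if h : PySem.Int.mod val 2 = 0 ∧ val ≠ 0 then pvSyrLoop (PySem.Int.floordiv val 2) else val
termination_by val.natAbs
decreasing_by
  have h2 := h.1
  rw [PySem.Int.mod_eq_emod_of_pos (by omega)] at h2
  rw [PySem.Int.floordiv_eq_ediv_of_pos (by omega)]
  omega

def syracuse (n : Int) : Int := pvSyrLoop (3 * n + 1)

def v2_of_3n1 (n : Int) : Int := v2 (3 * n + 1)

def pvALoop : Nat → Int → List Int → List Int
  | 0, _, seq => seq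
  | k + 1, current, seq =>
    if current ≤ 0 then seq
    else
      let v := v2_of_3n1 current
      let seq2 := seq ++ [v]
      let current2 := syracuse current
      if current2 = 1 then seq2 else pvALoop k current2 seq2

def get_v2_sequence (n : Int) (length : Int) : List Int :=
  pvALoop length.toNat n []

-- ===== PORT B =====
-- Python's &, ^, >> and .bit_length() on the nonnegative ints reached here (val = 3n+1 > 0)
-- coincide exactly with Nat's &&&, ^^^, >>> and Nat.size, so the port goes through .toNat.
def get_v2_sequence_alt (n : Int) (length : Int) : List Int :=
  if length ≤ 0 ∨ n ≤ 0 then []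
  else
    let val := (3 * n + 1).toNat
    let low := val ^^^ (val &&& (val - 1))
    let c := low.size - 1
    let nxt := val >>> c
    if nxt = 1 then [(c : Int)]
    else (c : Int) :: get_v2_sequence_alt (nxt : Int) (length - 1)
termination_by length.toNat
decreasing_by omega

-- ===== PRECONDITION & SPEC =====
def Spec_get_v2_sequence (n : Int) (length : Int) (out : List Int) : Prop := out = get_v2_sequence_alt n length
instance (n : Int) (length : Int) (out : List Int) : Decidable (Spec_get_v2_sequence n length out) := by unfold Spec_get_v2_sequence; infer_instance

-- ===== CLAIM (what is proved, stated in full; the proofs are below) =====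
def Claim_equal_get_v2_sequence : Prop := ∀ (n : Int) (length : Int), Dom_get_v2_sequence n length → Spec_get_v2_sequence n length (get_v2_sequence n length)

-- ===== LEMMAS AND PROOFS =====

-- proof-side 2-adic valuation on Nat
def pvTz (m : Nat) : Nat :=
  if h : m % 2 = 0 ∧ m ≠ 0 then pvTz (m / 2) + 1 else 0
termination_by m
decreasing_by omega

theorem pvTz_even {m : Nat} (h : m % 2 = 0) (h0 : m ≠ 0) : pvTz m = pvTz (m / 2) + 1 := by
  rw [pvTz, dif_pos ⟨h, h0⟩]

theorem pvTz_odd {m : Nat} (h : m % 2 = 1) : pvTz m = 0 := by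
  rw [pvTz, dif_neg (by omega)]

-- doubling instances of Nat.land_bit / Nat.xor_bit
theorem pvAnd_dd (x y : Nat) : (2 * x) &&& (2 * y + 1) = 2 * (x &&& y) := by
  simpa [Nat.bit_val] using Nat.land_bit false x true y

theorem pvAnd_dd' (x y : Nat) : (2 * x + 1) &&& (2 * y) = 2 * (x &&& y) := by
  simpa [Nat.bit_val] using Nat.land_bit true x false y

theorem pvXor_dd (x y : Nat) : (2 * x) ^^^ (2 * y) = 2 * (x ^^^ y) := by
  simpa [Nat.bit_val] using Nat.xor_bit false x false y

theorem pvXor_dd' (x y : Nat) : (2 * x + 1) ^^^ (2 * y) = 2 * (x ^^^ y) + 1 := by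
  simpa [Nat.bit_val] using Nat.xor_bit true x false y

-- the lowest-set-bit trick: val ^ (val & (val-1)) = 2^(v2 val)
theorem pvLowbit (m : Nat) (hm : 0 < m) : m ^^^ (m &&& (m - 1)) = 2 ^ pvTz m := by
  induction m using Nat.strong_induction_on with
  | _ m ih =>
    by_cases he : m % 2 = 0
    · obtain ⟨a, rfl⟩ : ∃ a, m = 2 * a := ⟨m / 2, by omega⟩
      have ha : 0 < a := by omega
      have h1 : 2 * a - 1 = 2 * (a - 1) + 1 := by omega
      rw [h1, pvAnd_dd, pvXor_dd, ih a (by omega) ha,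
        pvTz_even he (by omega), Nat.mul_div_cancel_left _ (by norm_num), pow_succ]
      ring
    · obtain ⟨a, rfl⟩ : ∃ a, m = 2 * a + 1 := ⟨m / 2, by omega⟩
      have h1 : 2 * a + 1 - 1 = 2 * a := by omega
      rw [h1, pvAnd_dd', Nat.and_self, pvXor_dd', Nat.xor_self, pvTz_odd (by omega)]
      simp

-- A's v2 loop counts exactly pvTz (on positive input)
theorem pvV2Loop_eq (m : Nat) (hm : 0 < m) : ∀ c : Int, pvV2Loop (m : Int) c = c + (pvTz m : Int) := by
  induction m using Nat.strong_induction_on with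
  | _ m ih =>
    intro c
    by_cases he : m % 2 = 0
    · have h2 : PySem.Int.mod (m : Int) 2 = 0 := by
        rw [PySem.Int.mod_eq_emod_of_pos (by omega)]; omega
      rw [pvV2Loop, dif_pos ⟨h2, by exact_mod_cast (by omega : (m : Int) ≠ 0)⟩]
      have hf : PySem.Int.floordiv (m : Int) 2 = ((m / 2 : Nat) : Int) := by
        rw [PySem.Int.floordiv_eq_ediv_of_pos (by omega)]; omega
      rw [hf, ih (m / 2) (by omega) (by omega), pvTz_even he (by omega)]
      push_cast; ring
    · have h2 : ¬(PySem.Int.mod (m : Int) 2 = 0 ∧ (m : Int) ≠ 0) := by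
        rw [PySem.Int.mod_eq_emod_of_pos (by omega)]
        intro ⟨a, _⟩; omega
      rw [pvV2Loop, dif_neg h2, pvTz_odd (by omega)]
      simp

-- A's syracuse loop divides out exactly 2^(pvTz), i.e. one shift
theorem pvSyrLoop_eq (m : Nat) (hm : 0 < m) : pvSyrLoop (m : Int) = ((m >>> pvTz m : Nat) : Int) := by
  induction m using Nat.strong_induction_on with
  | _ m ih =>
    by_cases he : m % 2 = 0
    · have h2 : PySem.Int.mod (m : Int) 2 = 0 := by
        rw [PySem.Int.mod_eq_emod_of_pos (by omega)]; omega
      rw [pvSyrLoop, dif_pos ⟨h2, by exact_mod_cast (by omega : (m : Int) ≠ 0)⟩]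
      have hf : PySem.Int.floordiv (m : Int) 2 = ((m / 2 : Nat) : Int) := by
        rw [PySem.Int.floordiv_eq_ediv_of_pos (by omega)]; omega
      rw [hf, ih (m / 2) (by omega) (by omega), pvTz_even he (by omega)]
      congr 1
      rw [Nat.shiftRight_eq_div_pow, Nat.shiftRight_eq_div_pow, Nat.div_div_eq_div_mul,
        pow_succ']
    · have h2 : ¬(PySem.Int.mod (m : Int) 2 = 0 ∧ (m : Int) ≠ 0) := by
        rw [PySem.Int.mod_eq_emod_of_pos (by omega)]
        intro ⟨a, _⟩; omega
      rw [pvSyrLoop, dif_neg h2, pvTz_odd (by omega)]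
      simp

-- the per-step agreement: B's bit-trick count/shift equal A's v2_of_3n1 / syracuse
theorem pvStep_count (cur : Int) (m : Nat) (hm : (m : Int) = 3 * cur + 1) (hp : 0 < m) :
    v2_of_3n1 cur = (((m ^^^ (m &&& (m - 1))).size - 1 : Nat) : Int) := by
  rw [v2_of_3n1, v2, if_neg (by omega), ← hm, pvV2Loop_eq _ hp, pvLowbit _ hp, Nat.size_pow]
  simp

theorem pvStep_next (cur : Int) (m : Nat) (hm : (m : Int) = 3 * cur + 1) (hp : 0 < m) :
    syracuse cur = ((m >>> ((m ^^^ (m &&& (m - 1))).size - 1) : Nat) : Int) := by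
  rw [syracuse, ← hm, pvSyrLoop_eq _ hp, pvLowbit _ hp, Nat.size_pow]
  simp

theorem pvMain (k : Nat) : ∀ (len : Int), len.toNat = k → ∀ (cur : Int) (seq : List Int),
    pvALoop k cur seq = seq ++ get_v2_sequence_alt cur len := by
  induction k with
  | zero =>
    intro len hlen cur seq
    rw [get_v2_sequence_alt, if_pos (Or.inl (by omega))]
    simp [pvALoop]
  | succ k ih =>
    intro len hlen cur seq
    by_cases hc : cur ≤ 0
    · rw [get_v2_sequence_alt, if_pos (Or.inr hc)]
      simp [pvALoop, hc]
    · have hc' : 0 < cur := by omega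
      have hp : 0 < (3 * cur + 1).toNat := by omega
      have hm : (((3 * cur + 1).toNat : Nat) : Int) = 3 * cur + 1 := Int.toNat_of_nonneg (by omega)
      rw [pvALoop, if_neg hc, get_v2_sequence_alt, if_neg (show ¬(len ≤ 0 ∨ cur ≤ 0) by omega)]
      simp only [pvStep_count cur _ hm hp, pvStep_next cur _ hm hp]
      set m := (3 * cur + 1).toNat with hmdef
      set c := (m ^^^ (m &&& (m - 1))).size - 1 with hcdef
      by_cases h1 : (m >>> c : Nat) = 1
      · have h1' : ((m >>> c : Nat) : Int) = 1 := by rw [h1]; norm_num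
        rw [if_pos h1', if_pos h1]
      · have h1' : ((m >>> c : Nat) : Int) ≠ 1 := by exact_mod_cast h1
        rw [if_neg h1', if_neg h1, ih (len - 1) (by omega) _ _]
        simp

-- ===== VERDICT (by name: the statement is the Claim_ definition above) =====
theorem get_v2_sequence_spec : Claim_equal_get_v2_sequence := by
  intro n length _
  unfold Spec_get_v2_sequence get_v2_sequence
  exact pvMain length.toNat length rfl n []
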